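-- pv_equiv track=rewrite | github.com/HLC-Lab/bine_trees_fugaku | simulation/binomial.py | get_children_range
-- ===== SOURCE A (Python) =====
-- def get_children_range(children, relabels, num_nodes, r):
--     # Find the minimum and maximum (remapped) rank (i.e., block index) in that subtree
--     min_block_id = num_nodes
--     max_block_id = -1
--     # Collapse the subtree into a single list
--     # Do a DFS visit of the subtree
--     stack = [r]
--     relabeled_children = []
--     while len(stack):
--         node = stack.pop()
--         relabeled_children.append(relabels[node])
--         if relabels[node] < min_block_id:
--             min_block_id = relabels[node]
--         if relabels[node] > max_block_id:
--             max_block_id = relabels[node]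
--         if children[node] is not None:
--             stack.extend(children[node])
--     return min_block_id, max_block_id, relabeled_children
-- ===== SOURCE B (Python) =====
-- def get_children_range(children, relabels, num_nodes, r):
--     # Pre-order DFS by recursion; children are taken right-to-left so the
--     # visit order is last-child-first.
--     def dfs(node):
--         out = [relabels[node]]
--         cs = children[node]
--         if cs is not None:
--             for c in reversed(cs):
--                 out.extend(dfs(c))
--         return out
--     relabeled_children = dfs(r)
--     # Block ids live in [0, num_nodes): fold the visited ids into that range's
--     # extremes in a single separate pass.
--     min_block_id = num_nodes
--     max_block_id = -1
--     for v in relabeled_children: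
--         if v < min_block_id:
--             min_block_id = v
--         if v > max_block_id:
--             max_block_id = v
--     return min_block_id, max_block_id, relabeled_children
-- ===== Notes on version B (the rewrite author's own statement) =====
-- stated objective: alternative
-- what changed: Replaces A's explicit-stack DFS loop with inline min/max tracking by a recursive pre-order DFS that builds the visit list, followed by one separate min/max pass over it; Pre_ excludes only inputs on which A raises IndexError or loops forever (an out-of-range index reachable from r, or a reachable cycle).
import Mathlib
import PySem

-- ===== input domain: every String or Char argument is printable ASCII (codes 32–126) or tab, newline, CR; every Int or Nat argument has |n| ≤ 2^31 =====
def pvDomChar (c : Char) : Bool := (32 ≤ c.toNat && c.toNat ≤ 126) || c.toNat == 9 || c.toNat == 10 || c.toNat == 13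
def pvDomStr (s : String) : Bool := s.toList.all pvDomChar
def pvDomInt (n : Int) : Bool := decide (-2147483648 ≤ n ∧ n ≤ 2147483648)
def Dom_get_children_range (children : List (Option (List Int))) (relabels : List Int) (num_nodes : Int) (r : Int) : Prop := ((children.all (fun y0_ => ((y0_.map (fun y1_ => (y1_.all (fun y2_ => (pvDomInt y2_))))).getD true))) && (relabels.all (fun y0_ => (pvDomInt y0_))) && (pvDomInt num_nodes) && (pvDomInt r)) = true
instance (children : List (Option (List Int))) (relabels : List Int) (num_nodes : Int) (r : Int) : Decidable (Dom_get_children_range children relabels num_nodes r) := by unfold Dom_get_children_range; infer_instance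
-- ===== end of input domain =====

-- B replaces A's explicit-stack DFS loop with inline min/max tracking by a recursive
-- pre-order DFS building the list, followed by a separate min/max pass; alternative
-- decomposition, same asymptotic cost.


-- ===== PORT A =====
-- A's while loop, with the stack kept top-first (Python pops from the end, so
-- `stack.extend(cs)` followed by LIFO pops is `cs.reverse ++ rest` here).
-- The loop gets a fuel parameter (Python's `while` has none); under
-- Pre_get_children_range the fuel below is proved sufficient, so it is never exhausted.
def pvLoopA (children : List (Option (List Int))) (relabels : List Int) :
    Nat → List Int → Int → Int → List Int → Int × Int × List Int
  | 0, _, mn, mx, acc => (mn, mx, acc)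
  | _ + 1, [], mn, mx, acc => (mn, mx, acc)
  | fuel + 1, node :: rest, mn, mx, acc =>
      let rl := PySem.List.pyGetD relabels node 0
      let mn' := if rl < mn then rl else mn
      let mx' := if rl > mx then rl else mx
      match PySem.List.pyGetD children node none with
      | none => pvLoopA children relabels fuel rest mn' mx' (acc ++ [rl])
      | some cs => pvLoopA children relabels fuel (cs.reverse ++ rest) mn' mx' (acc ++ [rl])

def pvLen1 (o : Option (List Int)) : Nat := (o.map List.length).getD 0

def pvFuelA (children : List (Option (List Int))) : Nat :=
  ((children.map pvLen1).sum + 1) ^ children.length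

def get_children_range (children : List (Option (List Int))) (relabels : List Int) (num_nodes : Int) (r : Int) : Int × Int × List Int :=
  pvLoopA children relabels (pvFuelA children) [r] num_nodes (-1) []

-- ===== PORT B =====
-- Source B's recursive dfs; fuel bounds the recursion depth (Python has none; under
-- Pre_ the recursion depth is at most children.length, so the fuel below suffices).
def pvDfsB (children : List (Option (List Int))) (relabels : List Int) :
    Nat → Int → List Int
  | 0, _ => []
  | fuel + 1, node =>
      PySem.List.pyGetD relabels node 0 ::
      (match PySem.List.pyGetD children node none with
       | none => []
       | some cs => cs.reverse.flatMap (pvDfsB children relabels fuel))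

def get_children_range_alt (children : List (Option (List Int))) (relabels : List Int) (num_nodes : Int) (r : Int) : Int × Int × List Int :=
  let L := pvDfsB children relabels (children.length + 1) r
  let p := L.foldl (fun (p : Int × Int) v =>
      (if v < p.1 then v else p.1, if v > p.2 then v else p.2)) (num_nodes, -1)
  (p.1, p.2, L)

-- ===== PRECONDITION & SPEC =====
-- Graph view of the input used by the precondition: nodes are the normalized
-- (wraparound-resolved) indices 0..len-1, and u has an edge to each in-range
-- entry of children[u].
def pvIdx (n : Nat) (v : Int) : Nat := (if v < 0 then v + n else v).toNat
def pvEntries (children : List (Option (List Int))) (u : Nat) : List Int :=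
  ((children.getD u none).getD [])
def pvSuccs (children : List (Option (List Int))) (u : Nat) : List Nat :=
  (pvEntries children u).filterMap (fun c =>
    if -(children.length : Int) ≤ c ∧ c < (children.length : Int)
    then some (pvIdx children.length c) else none)
def pvStep (children : List (Option (List Int))) (S : List Nat) : List Nat :=
  (S ++ S.flatMap (pvSuccs children)).dedup
def pvReach (children : List (Option (List Int))) (u : Nat) : List Nat :=
  (pvStep children)^[children.length] [u]

-- Pre_ holds exactly when A returns normally: r is a valid (possibly negative)
-- Python index into both arrays, every child index reachable from r is valid for
-- both arrays, and the reachable child graph is acyclic.  Outside Pre_, A either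
-- raises IndexError (an out-of-range index is popped) or loops forever (a
-- reachable cycle, revisited endlessly since A keeps no visited set).
def Pre_get_children_range (children : List (Option (List Int))) (relabels : List Int) (num_nodes : Int) (r : Int) : Prop :=
  PySem.Raise.InRange children.length r ∧ PySem.Raise.InRange relabels.length r ∧
  (∀ u ∈ pvReach children (pvIdx children.length r), ∀ c ∈ pvEntries children u,
      PySem.Raise.InRange children.length c ∧ PySem.Raise.InRange relabels.length c) ∧
  (∀ u ∈ pvReach children (pvIdx children.length r), ∀ v ∈ pvSuccs children u,
      u ∉ pvReach children v)
instance (children : List (Option (List Int))) (relabels : List Int) (num_nodes : Int) (r : Int) : Decidable (Pre_get_children_range children relabels num_nodes r) := by unfold Pre_get_children_range; infer_instance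

def pvWitness_get_children_range : List (Option (List Int)) × List Int × Int × Int :=
  ([some [1, 2], none, none], [0, 1, 2], 3, 0)

def Spec_get_children_range (children : List (Option (List Int))) (relabels : List Int) (num_nodes : Int) (r : Int) (out : Int × Int × List Int) : Prop := out = get_children_range_alt children relabels num_nodes r
instance (children : List (Option (List Int))) (relabels : List Int) (num_nodes : Int) (r : Int) (out : Int × Int × List Int) : Decidable (Spec_get_children_range children relabels num_nodes r out) := by unfold Spec_get_children_range; infer_instance

-- ===== CLAIM (what is proved, stated in full; the proofs are below) =====
def Claim_equal_get_children_range : Prop := ∀ (children : List (Option (List Int))) (relabels : List Int) (num_nodes : Int) (r : Int), Dom_get_children_range children relabels num_nodes r → Pre_get_children_range children relabels num_nodes r → Spec_get_children_range children relabels num_nodes r (get_children_range children relabels num_nodes r)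


-- ===== LEMMAS AND PROOFS =====

-- InRange, unfolded
theorem pv_inRange_iff (len : Nat) (i : Int) :
    PySem.Raise.InRange len i ↔ (-(len : Int) ≤ i ∧ i < len) := by
  constructor <;> intro h <;> simpa [PySem.Raise.InRange] using h

theorem pv_idx_lt {n : Nat} {v : Int} (h : PySem.Raise.InRange n v) : pvIdx n v < n := by
  rw [pv_inRange_iff] at h
  unfold pvIdx
  split_ifs <;> omega

-- a valid (possibly negative) Python index reads the normalized slot
theorem pv_pyGetD_idx {alpha : Type} (xs : List alpha) (d : alpha) (v : Int)
    (h : PySem.Raise.InRange xs.length v) :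
    PySem.List.pyGetD xs v d = xs.getD (pvIdx xs.length v) d := by
  rw [pv_inRange_iff] at h
  by_cases h0 : 0 <= v
  . rw [PySem.List.pyGetD_eq_getElem xs d h0 h.2]
    rw [List.getD_eq_getElem _ _ (by unfold pvIdx; split_ifs <;> omega)]
    congr 1
    unfold pvIdx
    rw [if_neg (by omega)]
  . have hk : v = -(((-v).toNat : Nat) : Int) := by omega
    rw [hk, PySem.List.pyGetD_neg_natCast xs ((-v).toNat) d (by omega) (by omega)]
    rw [List.getD_eq_getElem _ _ (by unfold pvIdx; split_ifs <;> omega)]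
    congr 1
    unfold pvIdx
    rw [if_pos (by omega)]
    omega

-- step / reach basics
theorem pv_mem_step (children : List (Option (List Int))) (S : List Nat) (x : Nat) :
    x ∈ pvStep children S ↔ (x ∈ S ∨ ∃ u ∈ S, x ∈ pvSuccs children u) := by
  simp [pvStep, List.mem_dedup, List.mem_append, List.mem_flatMap]

theorem pv_subset_step (children : List (Option (List Int))) (S : List Nat) :
    S ⊆ pvStep children S := by
  intro x hx
  rw [pv_mem_step]
  exact Or.inl hx

theorem pv_step_congr (children : List (Option (List Int))) {S T : List Nat}
    (h : ∀ x, x ∈ S ↔ x ∈ T) (x : Nat) :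
    x ∈ pvStep children S ↔ x ∈ pvStep children T := by
  simp only [pv_mem_step, h]

theorem pv_mem_iter_self (children : List (Option (List Int))) (S : List Nat) :
    ∀ k, S ⊆ (pvStep children)^[k] S := by
  intro k
  induction k with
  | zero => exact fun x hx => hx
  | succ k ih =>
    intro x hx
    rw [Function.iterate_succ_apply']
    exact pv_subset_step children _ (ih hx)

theorem pv_succ_lt (children : List (Option (List Int))) (u : Nat) {x : Nat}
    (hx : x ∈ pvSuccs children u) : x < children.length := by
  simp only [pvSuccs, List.mem_filterMap] at hx
  obtain ⟨c, _, hc⟩ := hx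
  split_ifs at hc with hcond
  . cases hc
    unfold pvIdx
    split_ifs <;> omega

theorem pv_iter_elem_bound (children : List (Option (List Int))) (u : Nat) :
    ∀ k x, x ∈ (pvStep children)^[k] [u] → x = u ∨ x < children.length := by
  intro k
  induction k with
  | zero => intro x hx; simp at hx; exact Or.inl hx
  | succ k ih =>
    intro x hx
    rw [Function.iterate_succ_apply'] at hx
    rw [pv_mem_step] at hx
    rcases hx with hx | ⟨v, hv, hx⟩
    . exact ih x hx
    . exact Or.inr (pv_succ_lt children v hx)

theorem pv_iter_subset_insert (children : List (Option (List Int))) (u : Nat) (k : Nat) :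
    ((pvStep children)^[k] [u]).toFinset ⊆ insert u (Finset.range children.length) := by
  intro x hx
  rw [List.mem_toFinset] at hx
  rcases pv_iter_elem_bound children u k x hx with h | h
  . simp [h]
  . simp [h]

-- the n-fold closure is a fixpoint
theorem pv_reach_fixpoint (children : List (Option (List Int))) (u : Nat) (x : Nat) :
    x ∈ pvStep children (pvReach children u) ↔ x ∈ pvReach children u := by
  by_cases hfix : ∃ k, k ≤ children.length ∧
      (∀ y, y ∈ (pvStep children)^[k] [u] ↔ y ∈ (pvStep children)^[k+1] [u])
  . obtain ⟨k, hk, hiff⟩ := hfix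
    have hall : ∀ m y, y ∈ (pvStep children)^[k+m] [u] ↔ y ∈ (pvStep children)^[k] [u] := by
      intro m
      induction m with
      | zero => intro y; rfl
      | succ m ih =>
        intro y
        have h1 : ∀ y, y ∈ (pvStep children)^[k+m+1] [u] ↔ y ∈ (pvStep children)^[k+1] [u] := by
          intro y
          rw [Function.iterate_succ_apply', Function.iterate_succ_apply']
          exact pv_step_congr children ih y
        exact (h1 y).trans (hiff y).symm
    have h1 : ∀ y, y ∈ pvReach children u ↔ y ∈ (pvStep children)^[k] [u] := by
      intro y
      have := hall (children.length - k) y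
      rw [show k + (children.length - k) = children.length from by omega] at this
      exact this
    constructor
    . intro hx
      have hx2 : x ∈ pvStep children ((pvStep children)^[k] [u]) :=
        (pv_step_congr children h1 x).mp hx
      have hx3 : x ∈ (pvStep children)^[k+1] [u] := by
        rw [Function.iterate_succ_apply']
        exact hx2
      exact (h1 x).mpr ((hiff x).mpr hx3)
    . intro hx
      exact pv_subset_step children _ hx
  . exfalso
    push_neg at hfix
    have hgrow : ∀ k, k ≤ children.length + 1 →
        k + 1 ≤ ((pvStep children)^[k] [u]).toFinset.card := by
      intro k
      induction k with
      | zero => intro _; simp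
      | succ k ih =>
        intro hk
        have hcard := ih (by omega)
        obtain ⟨y, hy0⟩ := hfix k (by omega)
        have hmono : ((pvStep children)^[k] [u]).toFinset ⊆ ((pvStep children)^[k+1] [u]).toFinset := by
          intro z hz
          rw [List.mem_toFinset] at hz ⊢
          rw [Function.iterate_succ_apply']
          exact pv_subset_step children _ hz
        have hy2 : y ∈ (pvStep children)^[k+1] [u] ∧ y ∉ (pvStep children)^[k] [u] := by
          rcases hy0 with ⟨h1, h2⟩ | ⟨h1, h2⟩
          . exact absurd (by
              rw [Function.iterate_succ_apply']
              exact pv_subset_step children _ h1) h2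
          . exact ⟨h2, h1⟩
        have hss : ((pvStep children)^[k] [u]).toFinset ⊂ ((pvStep children)^[k+1] [u]).toFinset := by
          refine ⟨hmono, fun hsub => ?_⟩
          exact hy2.2 (List.mem_toFinset.mp (hsub (List.mem_toFinset.mpr hy2.1)))
        have := Finset.card_lt_card hss
        omega
    have hbig := hgrow (children.length + 1) (le_refl _)
    have hsmall := Finset.card_le_card (pv_iter_subset_insert children u (children.length + 1))
    have : (insert u (Finset.range children.length)).card ≤ children.length + 1 := by
      exact le_trans (Finset.card_insert_le _ _) (by simp)
    omega

-- inductive reachability, and its agreement with the closure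
inductive pvReaches (children : List (Option (List Int))) : Nat → Nat → Prop
  | refl (u : Nat) : pvReaches children u u
  | tail {u v w : Nat} : pvReaches children u v → w ∈ pvSuccs children v → pvReaches children u w

theorem pv_mem_reach_of_reaches {children : List (Option (List Int))} {u w : Nat}
    (h : pvReaches children u w) : w ∈ pvReach children u := by
  induction h with
  | refl => exact pv_mem_iter_self children _ children.length (by simp)
  | tail hp hs ih =>
    rw [← pv_reach_fixpoint]
    rw [pv_mem_step]
    exact Or.inr ⟨_, ih, hs⟩

theorem pv_reaches_of_mem_reach {children : List (Option (List Int))} {u w : Nat}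
    (h : w ∈ pvReach children u) : pvReaches children u w := by
  suffices hgen : ∀ k x, x ∈ (pvStep children)^[k] [u] → pvReaches children u x from
    hgen children.length w h
  intro k
  induction k with
  | zero => intro x hx; simp at hx; subst hx; exact pvReaches.refl _
  | succ k ih =>
    intro x hx
    rw [Function.iterate_succ_apply', pv_mem_step] at hx
    rcases hx with hx | ⟨v, hv, hx⟩
    . exact ih x hx
    . exact pvReaches.tail (ih v hv) hx

theorem pv_reaches_trans {children : List (Option (List Int))} {u v w : Nat}
    (h1 : pvReaches children u v) (h2 : pvReaches children v w) : pvReaches children u w := by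
  induction h2 with
  | refl => exact h1
  | tail _ hs ih => exact pvReaches.tail ih hs

theorem pv_reach_subset_of_succ {children : List (Option (List Int))} {u v : Nat}
    (hv : v ∈ pvSuccs children u) : pvReach children v ⊆ pvReach children u := by
  intro w hw
  exact pv_mem_reach_of_reaches
    (pv_reaches_trans (pvReaches.tail (pvReaches.refl u) hv) (pv_reaches_of_mem_reach hw))

-- rank: the number of nodes reachable from u; it strictly drops along an edge
def pvRank (children : List (Option (List Int))) (u : Nat) : Nat :=
  (pvReach children u).toFinset.card

theorem pv_self_mem_reach (children : List (Option (List Int))) (u : Nat) :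
    u ∈ pvReach children u :=
  pv_mem_reach_of_reaches (pvReaches.refl u)

theorem pv_rank_pos (children : List (Option (List Int))) (u : Nat) :
    1 ≤ pvRank children u :=
  Finset.card_pos.mpr ⟨u, List.mem_toFinset.mpr (pv_self_mem_reach children u)⟩

theorem pv_rank_lt {children : List (Option (List Int))} {u v : Nat}
    (hv : v ∈ pvSuccs children u) (hacy : u ∉ pvReach children v) :
    pvRank children v < pvRank children u := by
  apply Finset.card_lt_card
  constructor
  . intro x hx
    rw [List.mem_toFinset] at hx ⊢
    exact pv_reach_subset_of_succ hv hx
  . intro hsub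
    exact hacy (List.mem_toFinset.mp (hsub (List.mem_toFinset.mpr (pv_self_mem_reach children u))))

theorem pv_rank_le {children : List (Option (List Int))} {u : Nat}
    (hu : u < children.length) : pvRank children u ≤ children.length := by
  unfold pvRank
  have hsub : (pvReach children u).toFinset ⊆ Finset.range children.length := by
    intro x hx
    rw [List.mem_toFinset] at hx
    rcases pv_iter_elem_bound children u children.length x hx with h | h
    . simp [h, hu]
    . simp [h]
  exact le_trans (Finset.card_le_card hsub) (by simp)

-- child facts at a visited node: valid for both arrays, stays in the reachable
-- set, and the rank strictly drops
theorem pv_child_facts {children : List (Option (List Int))} {relabels : List Int} {ρ : List Nat}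
    (hEnt : ∀ u ∈ ρ, ∀ c ∈ pvEntries children u,
        PySem.Raise.InRange children.length c ∧ PySem.Raise.InRange relabels.length c)
    (hAcy : ∀ u ∈ ρ, ∀ v ∈ pvSuccs children u, u ∉ pvReach children v)
    (hClosed : ∀ u ∈ ρ, ∀ v ∈ pvSuccs children u, v ∈ ρ)
    {v : Int} (hv1 : PySem.Raise.InRange children.length v)
    (hv3 : pvIdx children.length v ∈ ρ)
    {cs : List Int} (hcs : PySem.List.pyGetD children v none = some cs)
    {c : Int} (hc : c ∈ cs) :
    PySem.Raise.InRange children.length c ∧ PySem.Raise.InRange relabels.length c ∧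
    pvIdx children.length c ∈ ρ ∧
    pvRank children (pvIdx children.length c) < pvRank children (pvIdx children.length v) := by
  have hEq : pvEntries children (pvIdx children.length v) = cs := by
    unfold pvEntries
    rw [← pv_pyGetD_idx children none v hv1, hcs]
    rfl
  have hcEnt := hEnt _ hv3 c (by rw [hEq]; exact hc)
  have hsucc : pvIdx children.length c ∈ pvSuccs children (pvIdx children.length v) := by
    unfold pvSuccs
    rw [List.mem_filterMap]
    refine ⟨c, by rw [hEq]; exact hc, ?_⟩
    rw [if_pos ((pv_inRange_iff children.length c).mp hcEnt.1)]
  exact ⟨hcEnt.1, hcEnt.2, hClosed _ hv3 _ hsucc,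
    pv_rank_lt hsucc (hAcy _ hv3 _ hsucc)⟩

-- canonical DFS result of a node: B's recursion with fuel pinned to the node's rank
def pvD (children : List (Option (List Int))) (relabels : List Int) (v : Int) : List Int :=
  pvDfsB children relabels (pvRank children (pvIdx children.length v)) v

-- potential of a stack entry, measured by its rank
def pvW (children : List (Option (List Int))) (v : Int) : Nat :=
  ((children.map pvLen1).sum + 1) ^ pvRank children (pvIdx children.length v)

theorem pv_flatMap_congr {α β : Type} {l : List α} {f g : α → List β}
    (h : ∀ a ∈ l, f a = g a) : l.flatMap f = l.flatMap g := by
  induction l with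
  | nil => rfl
  | cons x t ih =>
    simp only [List.flatMap_cons]
    rw [h x (by simp), ih (fun a ha => h a (by simp [ha]))]

theorem pvDfsB_fuel {children : List (Option (List Int))} {relabels : List Int} {ρ : List Nat}
    (hEnt : ∀ u ∈ ρ, ∀ c ∈ pvEntries children u,
        PySem.Raise.InRange children.length c ∧ PySem.Raise.InRange relabels.length c)
    (hAcy : ∀ u ∈ ρ, ∀ v ∈ pvSuccs children u, u ∉ pvReach children v)
    (hClosed : ∀ u ∈ ρ, ∀ v ∈ pvSuccs children u, v ∈ ρ) :
    ∀ (f g : Nat) (v : Int), PySem.Raise.InRange children.length v →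
      pvIdx children.length v ∈ ρ →
      pvRank children (pvIdx children.length v) ≤ f →
      pvRank children (pvIdx children.length v) ≤ g →
      pvDfsB children relabels f v = pvDfsB children relabels g v := by
  intro f
  induction f with
  | zero =>
    intro g v _ _ hf _
    exact absurd (le_trans (pv_rank_pos children _) hf) (by omega)
  | succ f ih =>
    intro g v hv1 hv3 hf hg
    have hg1 : 1 ≤ g := le_trans (pv_rank_pos children _) hg
    obtain ⟨g', rfl⟩ : ∃ g', g = g' + 1 := ⟨g - 1, by omega⟩
    simp only [pvDfsB]
    congr 1
    cases hcs : PySem.List.pyGetD children v none with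
    | none => rfl
    | some cs =>
      apply pv_flatMap_congr
      intro c hcm
      have hc := pv_child_facts hEnt hAcy hClosed hv1 hv3 hcs (List.mem_reverse.mp hcm)
      exact ih g' c hc.1 hc.2.2.1 (by omega) (by omega)

theorem pvDfsB_eq_pvD {children : List (Option (List Int))} {relabels : List Int} {ρ : List Nat}
    (hEnt : ∀ u ∈ ρ, ∀ c ∈ pvEntries children u,
        PySem.Raise.InRange children.length c ∧ PySem.Raise.InRange relabels.length c)
    (hAcy : ∀ u ∈ ρ, ∀ v ∈ pvSuccs children u, u ∉ pvReach children v)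
    (hClosed : ∀ u ∈ ρ, ∀ v ∈ pvSuccs children u, v ∈ ρ)
    {f : Nat} {v : Int} (hv1 : PySem.Raise.InRange children.length v)
    (hv3 : pvIdx children.length v ∈ ρ)
    (hf : pvRank children (pvIdx children.length v) ≤ f) :
    pvDfsB children relabels f v = pvD children relabels v :=
  pvDfsB_fuel hEnt hAcy hClosed f _ v hv1 hv3 hf (le_refl _)

theorem pvLoopA_spec {children : List (Option (List Int))} {relabels : List Int} {ρ : List Nat}
    (hEnt : ∀ u ∈ ρ, ∀ c ∈ pvEntries children u,
        PySem.Raise.InRange children.length c ∧ PySem.Raise.InRange relabels.length c)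
    (hAcy : ∀ u ∈ ρ, ∀ v ∈ pvSuccs children u, u ∉ pvReach children v)
    (hClosed : ∀ u ∈ ρ, ∀ v ∈ pvSuccs children u, v ∈ ρ) :
    ∀ (fuel : Nat) (stack : List Int) (mn mx : Int) (acc : List Int),
      (∀ v ∈ stack, PySem.Raise.InRange children.length v ∧
          PySem.Raise.InRange relabels.length v ∧ pvIdx children.length v ∈ ρ) →
      (stack.map (pvW children)).sum ≤ fuel →
      pvLoopA children relabels fuel stack mn mx acc =
        ((stack.flatMap (pvD children relabels)).foldl (fun a b => if b < a then b else a) mn,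
         (stack.flatMap (pvD children relabels)).foldl (fun a b => if b > a then b else a) mx,
         acc ++ stack.flatMap (pvD children relabels)) := by
  intro fuel
  induction fuel with
  | zero =>
    intro stack mn mx acc hV hcost
    cases stack with
    | nil => simp [pvLoopA]
    | cons v rest =>
      exfalso
      have h1 : 1 ≤ pvW children v := Nat.one_le_pow _ _ (by omega)
      simp only [List.map_cons, List.sum_cons] at hcost
      omega
  | succ fuel ih =>
    intro stack mn mx acc hV hcost
    cases stack with
    | nil => simp [pvLoopA]
    | cons v rest =>
      obtain ⟨hv1, hv2, hv3⟩ := hV v (by simp)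
      obtain ⟨m, hm⟩ : ∃ m, pvRank children (pvIdx children.length v) = m + 1 :=
        ⟨pvRank children (pvIdx children.length v) - 1, by
          have := pv_rank_pos children (pvIdx children.length v); omega⟩
      have hK1 : 1 ≤ (children.map pvLen1).sum + 1 := by omega
      cases hcs : PySem.List.pyGetD children v none with
      | none =>
        simp only [pvLoopA, hcs]
        have hD : pvD children relabels v = [PySem.List.pyGetD relabels v 0] := by
          simp only [pvD, hm, pvDfsB, hcs]
        have hcost' : (rest.map (pvW children)).sum ≤ fuel := by
          have h1 : 1 ≤ pvW children v := Nat.one_le_pow _ _ (by omega)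
          simp only [List.map_cons, List.sum_cons] at hcost
          omega
        rw [ih rest _ _ _ (fun x hx => hV x (by simp [hx])) hcost']
        simp [hD, List.append_assoc]
      | some cs =>
        simp only [pvLoopA, hcs]
        have hchild : ∀ c ∈ cs,
            PySem.Raise.InRange children.length c ∧ PySem.Raise.InRange relabels.length c ∧
            pvIdx children.length c ∈ ρ ∧
            pvRank children (pvIdx children.length c) < pvRank children (pvIdx children.length v) :=
          fun c hc => pv_child_facts hEnt hAcy hClosed hv1 hv3 hcs hc
        -- fuel accounting: the popped node's potential covers its children and one step
        have hlencs : cs.length ≤ (children.map pvLen1).sum := by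
          have hvi : pvIdx children.length v < children.length := pv_idx_lt hv1
          have hget : PySem.List.pyGetD children v none =
              children.getD (pvIdx children.length v) none := pv_pyGetD_idx children none v hv1
          have hgd : children.getD (pvIdx children.length v) none =
              children[pvIdx children.length v] := List.getD_eq_getElem _ _ hvi
          have hmem : pvLen1 children[pvIdx children.length v] ∈ children.map pvLen1 :=
            List.mem_map.2 ⟨children[pvIdx children.length v], by simp, rfl⟩
          have hle := List.single_le_sum (l := children.map pvLen1)
            (fun x _ => Nat.zero_le x) _ hmem
          have heq : pvLen1 children[pvIdx children.length v] = cs.length := by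
            have : children[pvIdx children.length v] = some cs := by
              rw [← hgd, ← hget, hcs]
            rw [this]
            rfl
          omega
        have hWc : ∀ c ∈ cs.reverse, pvW children c ≤ ((children.map pvLen1).sum + 1) ^ m := by
          intro c hcm
          have := (hchild c (List.mem_reverse.mp hcm)).2.2.2
          exact Nat.pow_le_pow_right hK1 (by omega)
        have hsumcs : ((cs.reverse).map (pvW children)).sum ≤
            cs.length * ((children.map pvLen1).sum + 1) ^ m := by
          have := List.sum_le_card_nsmul ((cs.reverse).map (pvW children))
            (((children.map pvLen1).sum + 1) ^ m) (by
              intro x hx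
              obtain ⟨c, hcm, rfl⟩ := List.mem_map.1 hx
              exact hWc c hcm)
          simpa [smul_eq_mul] using this
        have hWv : pvW children v =
            ((children.map pvLen1).sum + 1) * ((children.map pvLen1).sum + 1) ^ m := by
          simp [pvW, hm, pow_succ, Nat.mul_comm]
        have hcost' : (((cs.reverse ++ rest)).map (pvW children)).sum ≤ fuel := by
          have hp : 1 ≤ ((children.map pvLen1).sum + 1) ^ m := Nat.one_le_pow _ _ (by omega)
          have h2 : cs.length * ((children.map pvLen1).sum + 1) ^ m +
              ((children.map pvLen1).sum + 1) ^ m ≤ pvW children v := by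
            rw [hWv]
            calc cs.length * ((children.map pvLen1).sum + 1) ^ m +
                ((children.map pvLen1).sum + 1) ^ m
                ≤ (children.map pvLen1).sum * ((children.map pvLen1).sum + 1) ^ m +
                  ((children.map pvLen1).sum + 1) ^ m :=
                  Nat.add_le_add_right (Nat.mul_le_mul_right _ hlencs) _
              _ = ((children.map pvLen1).sum + 1) * ((children.map pvLen1).sum + 1) ^ m := by ring
          simp only [List.map_cons, List.sum_cons] at hcost
          simp only [List.map_append, List.sum_append]
          omega
        rw [ih (cs.reverse ++ rest) _ _ _ (by
              intro x hx
              rcases List.mem_append.1 hx with h | h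
              · have := hchild x (List.mem_reverse.mp h)
                exact ⟨this.1, this.2.1, this.2.2.1⟩
              · exact hV x (by simp [h])) hcost']
        have hD : pvD children relabels v = PySem.List.pyGetD relabels v 0 ::
            (cs.reverse.flatMap (pvD children relabels)) := by
          simp only [pvD, hm, pvDfsB, hcs]
          congr 1
          apply pv_flatMap_congr
          intro c hcm
          have hc := hchild c (List.mem_reverse.mp hcm)
          exact pvDfsB_eq_pvD hEnt hAcy hClosed hc.1 hc.2.2.1 (by omega)
        simp [hD, List.flatMap_append, List.append_assoc]

-- B's single min/max pass over a pair splits into the two folds A interleaves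
theorem pv_foldl_pair (L : List Int) : ∀ a b : Int,
    L.foldl (fun (p : Int × Int) v =>
        (if v < p.1 then v else p.1, if v > p.2 then v else p.2)) (a, b) =
      (L.foldl (fun a b => if b < a then b else a) a,
       L.foldl (fun a b => if b > a then b else a) b) := by
  induction L with
  | nil => intro a b; rfl
  | cons x t ih =>
    intro a b
    simp only [List.foldl_cons]
    exact ih _ _

-- ===== VERDICT (by name: the statement is the Claim_ definition above) =====
theorem get_children_range_spec : Claim_equal_get_children_range := by
  intro children relabels num_nodes r _hDom hPre
  obtain ⟨hr1, hr2, hEnt, hAcy⟩ := hPre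
  have hClosed : ∀ u ∈ pvReach children (pvIdx children.length r),
      ∀ v ∈ pvSuccs children u, v ∈ pvReach children (pvIdx children.length r) := by
    intro u hu v hv
    rw [← pv_reach_fixpoint, pv_mem_step]
    exact Or.inr ⟨u, hu, hv⟩
  have hroot : pvIdx children.length r ∈ pvReach children (pvIdx children.length r) :=
    pv_self_mem_reach children _
  have hrank : pvRank children (pvIdx children.length r) ≤ children.length :=
    pv_rank_le (pv_idx_lt hr1)
  unfold Spec_get_children_range get_children_range get_children_range_alt
  rw [pvLoopA_spec hEnt hAcy hClosed (pvFuelA children) [r] num_nodes (-1) []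
      (by intro v hv; simp only [List.mem_singleton] at hv; subst hv; exact ⟨hr1, hr2, hroot⟩)
      (by
        simp only [List.map_cons, List.map_nil, List.sum_cons, List.sum_nil, Nat.add_zero]
        unfold pvW pvFuelA
        exact Nat.pow_le_pow_right (by omega) hrank)]
  have hB : pvDfsB children relabels (children.length + 1) r = pvD children relabels r :=
    pvDfsB_eq_pvD hEnt hAcy hClosed hr1 hroot (by omega)
  simp only [List.flatMap_cons, List.flatMap_nil, List.append_nil, List.nil_append, hB,
    pv_foldl_pair]
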